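-- pv_equiv track=rewrite | github.com/RathiAbhi/pythonDSA | LongestTree.py | findLargestTreeRoot
-- ===== SOURCE A (Python) =====
-- from collections import defaultdict, deque
--
-- def findLargestTreeRoot(forest):
--     # Step 1: Find root nodes
--     all_nodes = set()
--     children = set()
--     for child, parent in forest.items():
--         all_nodes.add(parent)
--         all_nodes.add(child)
--         children.add(child)
--     root_nodes = all_nodes - children  # Nodes that are not children are roots
--
--     # Step 2: Create adjacency list
--     adjacency_list = defaultdict(list)
--     for child, parent in forest.items():
--         adjacency_list[parent].append(child)
--
--     # Step 3: BFS to count nodes in each tree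
--     def bfs_count_nodes(root):
--         visited = set()
--         queue = deque([root])
--         count = 0
--         while queue:
--             node = queue.popleft()
--             if node not in visited:
--                 visited.add(node)
--                 count += 1
--                 queue.extend(adjacency_list[node])
--         return count
--
--     # Step 4: Find the largest tree root
--     max_count = -1
--     largest_root = None
--     for root in root_nodes:
--         node_count = bfs_count_nodes(root)
--         if node_count > max_count or (node_count == max_count and root < largest_root):
--             max_count = node_count
--             largest_root = root
--
--     return largest_root
-- ===== SOURCE B (Python) =====
-- def findLargestTreeRoot(forest):
--     # Step 1: find root nodes (nodes that never appear as a child)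
--     all_nodes = set()
--     children = set()
--     for child, parent in forest.items():
--         all_nodes.add(parent)
--         all_nodes.add(child)
--         children.add(child)
--     root_nodes = all_nodes - children
--
--     # Step 2: tally tree sizes by walking each node's parent chain upward
--     # (nodes on a parent cycle reach no root and are tallied nowhere)
--     count = {}
--     for node in all_nodes:
--         seen = set()
--         cur = node
--         while cur in forest:
--             if cur in seen:
--                 break
--             seen.add(cur)
--             cur = forest[cur]
--         else:
--             count[cur] = count.get(cur, 0) + 1
--
--     # Step 3: pick the root with the largest tally (smallest root on ties)
--     max_count = -1
--     largest_root = None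
--     for root in root_nodes:
--         node_count = count.get(root, 0)
--         if node_count > max_count or (node_count == max_count and root < largest_root):
--             max_count = node_count
--             largest_root = root
--     return largest_root
-- ===== Notes on version B (the rewrite author's own statement) =====
-- stated objective: alternative
-- what changed: The per-root BFS over a derived adjacency list is replaced by a single upward pass: every node follows its parent chain (with a seen-set to skip cycles) to its root and is tallied in a counter dict, so roots are scored by dictionary lookup instead of a breadth-first traversal per root.
import Mathlib
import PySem

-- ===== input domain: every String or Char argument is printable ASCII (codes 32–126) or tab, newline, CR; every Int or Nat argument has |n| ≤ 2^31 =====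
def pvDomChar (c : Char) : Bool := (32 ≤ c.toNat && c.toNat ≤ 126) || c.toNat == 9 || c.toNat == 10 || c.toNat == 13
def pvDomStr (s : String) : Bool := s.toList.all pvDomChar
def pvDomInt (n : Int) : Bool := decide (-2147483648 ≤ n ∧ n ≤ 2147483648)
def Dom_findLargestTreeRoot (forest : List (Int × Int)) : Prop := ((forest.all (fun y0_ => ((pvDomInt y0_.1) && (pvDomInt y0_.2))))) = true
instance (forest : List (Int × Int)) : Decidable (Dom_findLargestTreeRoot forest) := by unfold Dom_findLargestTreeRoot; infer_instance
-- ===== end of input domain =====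

-- B replaces A's per-root BFS over a derived adjacency list by a single upward pass that walks each
-- node's parent chain to its root and tallies roots in a counter dict (alternative decomposition).

-- ===== PORT A =====

-- Step 1 (identical text in both Pythons): build all_nodes and children sets in one loop
def pvSets (forest : List (Int × Int)) : PySem.Set Int × PySem.Set Int :=
  forest.foldl
    (fun s cp => (PySem.Set.add (PySem.Set.add s.1 cp.2) cp.1, PySem.Set.add s.2 cp.1))
    (PySem.Set.empty, PySem.Set.empty)

-- root_nodes = all_nodes - children
def pvRoots (forest : List (Int × Int)) : List Int :=
  PySem.Set.diff (pvSets forest).1 (pvSets forest).2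

-- Step 4 (identical text in both Pythons): the selection loop over root_nodes, parametrised by the
-- per-root size function each version uses.  The `none` branch of the tie-break comparison is where
-- Python would compare `root < None` (TypeError); it is unreachable because sizes are ≥ 1 > -1.
def pvSelect (roots : List Int) (size : Int → Int) : Option Int :=
  (roots.foldl
    (fun (acc : Int × Option Int) root =>
      let c := size root
      if c > acc.1 || (c == acc.1 && (match acc.2 with
                                      | some l => decide (root < l)
                                      | none => false))
      then (c, some root) else acc)
    ((-1 : Int), (none : Option Int))).2

-- Step 2: adjacency_list[parent].append(child)
def pvAdj (forest : List (Int × Int)) : PySem.Dict Int (List Int) :=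
  forest.foldl (fun d cp => d.modify cp.2 [] (fun l => l ++ [cp.1])) PySem.Dict.empty

-- Step 3: BFS counting loop.  Fuel bounds the number of iterations of the while loop; the
-- fuel-exhausted branch returns the count as-is (forest.length + 1 iterations always suffice:
-- each iteration pops one queue element, and at most 1 + forest.length elements are ever pushed).
def pvBfs (adj : PySem.Dict Int (List Int)) : Nat → List Int → PySem.Set Int → Int → Int
  | _, [], _, count => count
  | 0, _ :: _, _, count => count
  | fuel+1, node :: rest, visited, count =>
    if PySem.Set.contains visited node then pvBfs adj fuel rest visited count
    else pvBfs adj fuel (rest ++ adj.getD node []) (PySem.Set.add visited node) (count + 1)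

def findLargestTreeRoot (forest : List (Int × Int)) : Option Int :=
  pvSelect (pvRoots forest)
    (fun root => pvBfs (pvAdj forest) (forest.length + 1) [root] PySem.Set.empty 0)

-- ===== PORT B =====

-- walk the parent chain from cur; some r = chain ended at non-key r, none = cycle detected.
-- Fuel bounds the while loop; with distinct keys every iteration but the last adds a fresh key
-- to seen, so forest.length + 1 iterations always suffice and the fuel-out branch is unreachable.
def pvChase (forest : List (Int × Int)) : Nat → PySem.Set Int → Int → Option Int
  | 0, _, _ => none
  | fuel+1, seen, cur =>
    match PySem.Dict.get? ⟨forest⟩ cur with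
    | none => some cur
    | some p =>
      if PySem.Set.contains seen cur then none
      else pvChase forest fuel (PySem.Set.add seen cur) p

-- count[r] = count.get(r, 0) + 1 for the chain root r of every node (cycles tallied nowhere)
def pvTally (forest : List (Int × Int)) (nodes : List Int) : PySem.Dict Int Int :=
  nodes.foldl
    (fun d n =>
      match pvChase forest (forest.length + 1) PySem.Set.empty n with
      | some r => d.insert r (d.getD r 0 + 1)
      | none => d)
    PySem.Dict.empty

def findLargestTreeRoot_alt (forest : List (Int × Int)) : Option Int :=
  pvSelect (pvRoots forest)
    (fun root => (pvTally forest (pvSets forest).1).getD root 0)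

-- ===== PRECONDITION & SPEC =====

-- Pre_ excludes association lists with duplicate child keys: those do not represent a Python dict
-- (A's parameter is a dict, so no Python call ever sees them).
def Pre_findLargestTreeRoot (forest : List (Int × Int)) : Prop :=
  (forest.map Prod.fst).Nodup

instance (forest : List (Int × Int)) : Decidable (Pre_findLargestTreeRoot forest) := by
  unfold Pre_findLargestTreeRoot; infer_instance

def pvWitness_findLargestTreeRoot : (List (Int × Int)) := [(1, 0), (2, 0), (3, 2), (5, 4)]

def Spec_findLargestTreeRoot (forest : List (Int × Int)) (out : Option Int) : Prop :=
  out = findLargestTreeRoot_alt forest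
instance (forest : List (Int × Int)) (out : Option Int) : Decidable (Spec_findLargestTreeRoot forest out) := by
  unfold Spec_findLargestTreeRoot; infer_instance

-- ===== CLAIM (what is proved, stated in full; the proofs are below) =====
def Claim_equal_findLargestTreeRoot : Prop := ∀ (forest : List (Int × Int)), Dom_findLargestTreeRoot forest → Pre_findLargestTreeRoot forest → Spec_findLargestTreeRoot forest (findLargestTreeRoot forest)

-- ===== LEMMAS AND PROOFS =====

-- the parent function encoded by the dict
def pvPf (forest : List (Int × Int)) (n : Int) : Option Int :=
  PySem.Dict.get? ⟨forest⟩ n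

-- k-fold parent iteration
def pvIter (forest : List (Int × Int)) : Nat → Int → Option Int
  | 0, n => some n
  | k+1, n =>
    match pvPf forest n with
    | none => none
    | some p => pvIter forest k p

-- n belongs to the tree rooted at r
def pvReach (forest : List (Int × Int)) (r n : Int) : Prop :=
  ∃ k, pvIter forest k n = some r

-- the Bool predicate "n's chain ends at r" used to count both sides
def pvP (forest : List (Int × Int)) (r : Int) (n : Int) : Bool :=
  pvChase forest (forest.length + 1) PySem.Set.empty n == some r

-- ---- basic set facts ----

theorem pvSet_nodup_add {s : PySem.Set Int} (h : s.Nodup) (x : Int) : (PySem.Set.add s x).Nodup := by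
  unfold PySem.Set.add
  split
  · exact h
  · rename_i hc
    simp only [PySem.Set.contains, List.contains_iff_mem] at hc
    refine List.Nodup.append h (List.nodup_singleton x) ?_
    intro a ha hax
    rw [List.mem_singleton] at hax
    exact hc (hax ▸ ha)

theorem pvSets_eq (forest : List (Int × Int)) :
    pvSets forest =
      (forest.foldl (fun s cp => PySem.Set.add (PySem.Set.add s cp.2) cp.1) PySem.Set.empty,
       PySem.Set.ofList (forest.map Prod.fst)) := by
  unfold pvSets
  rw [PySem.Set.ofList_eq_foldl, List.foldl_map]
  exact PySem.List.foldl_prod_mk (fun s cp => PySem.Set.add (PySem.Set.add s cp.2) cp.1)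
    (fun s cp => PySem.Set.add s cp.1) forest PySem.Set.empty PySem.Set.empty

theorem pvAll_mem_aux (l : List (Int × Int)) (s : PySem.Set Int) (n : Int) :
    n ∈ l.foldl (fun s cp => PySem.Set.add (PySem.Set.add s cp.2) cp.1) s ↔
      n ∈ s ∨ ∃ cp ∈ l, n = cp.1 ∨ n = cp.2 := by
  induction l generalizing s with
  | nil => simp
  | cons cp t ih =>
    simp only [List.foldl_cons, ih, PySem.Set.mem_add, List.mem_cons]
    constructor
    · rintro (((h | h) | h) | ⟨q, hq, hn⟩)
      · exact Or.inl h
      · exact Or.inr ⟨cp, Or.inl rfl, Or.inr h⟩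
      · exact Or.inr ⟨cp, Or.inl rfl, Or.inl h⟩
      · exact Or.inr ⟨q, Or.inr hq, hn⟩
    · rintro (h | ⟨q, (rfl | hq), (hn | hn)⟩)
      · exact Or.inl (Or.inl (Or.inl h))
      · exact Or.inl (Or.inr hn)
      · exact Or.inl (Or.inl (Or.inr hn))
      · exact Or.inr ⟨q, hq, Or.inl hn⟩
      · exact Or.inr ⟨q, hq, Or.inr hn⟩

theorem pvAll_mem (forest : List (Int × Int)) (n : Int) :
    n ∈ (pvSets forest).1 ↔ ∃ cp ∈ forest, n = cp.1 ∨ n = cp.2 := by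
  rw [pvSets_eq]
  simpa [PySem.Set.empty] using pvAll_mem_aux forest PySem.Set.empty n

theorem pvAll_nodup_aux (l : List (Int × Int)) (s : PySem.Set Int) (hs : s.Nodup) :
    (l.foldl (fun s cp => PySem.Set.add (PySem.Set.add s cp.2) cp.1) s).Nodup := by
  induction l generalizing s with
  | nil => exact hs
  | cons cp t ih => exact ih _ (pvSet_nodup_add (pvSet_nodup_add hs _) _)

theorem pvAll_nodup (forest : List (Int × Int)) : (pvSets forest).1.Nodup := by
  rw [pvSets_eq]
  exact pvAll_nodup_aux forest PySem.Set.empty List.nodup_nil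

theorem pvChildren_mem (forest : List (Int × Int)) (n : Int) :
    n ∈ (pvSets forest).2 ↔ n ∈ forest.map Prod.fst := by
  rw [pvSets_eq]
  exact PySem.Set.mem_ofList _ n

theorem pvRoots_mem (forest : List (Int × Int)) (r : Int) :
    r ∈ pvRoots forest ↔ r ∈ (pvSets forest).1 ∧ r ∉ forest.map Prod.fst := by
  unfold pvRoots PySem.Set.diff
  simp [List.mem_filter, PySem.Set.contains, pvChildren_mem]

-- ---- parent-function facts ----

theorem pvPf_eq_some (forest : List (Int × Int)) (hnd : (forest.map Prod.fst).Nodup)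
    (c p : Int) : pvPf forest c = some p ↔ (c, p) ∈ forest := by
  unfold pvPf
  rw [PySem.Dict.get?_eq_some_iff_mem_items]
  simpa [PySem.Dict.keys_mk] using hnd

theorem pvPf_eq_none (forest : List (Int × Int)) (c : Int) :
    pvPf forest c = none ↔ c ∉ forest.map Prod.fst := by
  unfold pvPf
  rw [PySem.Dict.get?_eq_none_iff_not_mem_keys]
  simp [PySem.Dict.keys_mk]

theorem pvAdj_getD (forest : List (Int × Int)) (p : Int) :
    (pvAdj forest).getD p [] = (forest.filter (fun cp => cp.2 == p)).map (·.1) := by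
  unfold pvAdj
  have h := PySem.Dict.getD_foldl_modify_append (forest.map (fun cp => (cp.2, cp.1)))
    PySem.Dict.empty p
  rw [List.foldl_map] at h
  simpa [PySem.Dict.getD_empty, List.filter_map, List.map_map, Function.comp] using h

theorem pvIter_add (forest : List (Int × Int)) (a b : Nat) (n : Int) :
    pvIter forest (a + b) n =
      match pvIter forest a n with
      | none => none
      | some m => pvIter forest b m := by
  induction a generalizing n with
  | zero => simp [pvIter]
  | succ a ih =>
    rw [Nat.succ_add]
    cases h : pvPf forest n with
    | none => simp [pvIter, h]
    | some p => simp [pvIter, h, ih]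

theorem pvIter_isSome_of_le (forest : List (Int × Int)) {k i : Nat} (h : i ≤ k) {n r : Int}
    (hk : pvIter forest k n = some r) : ∃ m, pvIter forest i n = some m := by
  have hik : i + (k - i) = k := by omega
  rw [← hik, pvIter_add] at hk
  cases hi : pvIter forest i n with
  | none => rw [hi] at hk; exact absurd hk (by simp)
  | some m => exact ⟨m, rfl⟩

-- distinctness of the nodes on a chain ending at a parentless node
theorem pvIter_inj (forest : List (Int × Int)) {k : Nat} {n r : Int}
    (hr : pvPf forest r = none) (hk : pvIter forest k n = some r)
    {i j : Nat} (hij : i < j) (hjk : j ≤ k) {a : Int}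
    (hi : pvIter forest i n = some a) : pvIter forest j n ≠ some a := by
  intro hj
  -- the chain is periodic between i and j, so it can never reach the parentless r at step k
  have hk1 : pvIter forest (k + 1) n = none := by
    rw [pvIter_add forest k 1 n, hk]
    simp [pvIter, hr]
  have hia : pvIter forest (i + (k - i)) n = some r := by
    rw [show i + (k - i) = k by omega]; exact hk
  rw [pvIter_add forest i (k - i) n, hi] at hia
  -- hia : pvIter (k - i) a = some r
  have hja : pvIter forest (j + (k - i)) n = some r := by
    rw [pvIter_add forest j (k - i) n, hj]; exact hia
  have : pvIter forest (j + (k - i)) n = none := by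
    rw [show j + (k - i) = (k + 1) + (j - i - 1) by omega, pvIter_add forest (k + 1) _ n, hk1]
  rw [this] at hja
  exact absurd hja (by simp)

-- a chain ending at a parentless node has length at most the number of keys
theorem pvIter_len_le (forest : List (Int × Int)) {k : Nat} {n r : Int}
    (hr : pvPf forest r = none) (hk : pvIter forest k n = some r) : k ≤ forest.length := by
  -- the first k chain nodes are pairwise distinct keys of the dict
  classical
  set g : Nat → Int := fun i => (pvIter forest i n).getD 0 with hg
  have hsome : ∀ i, i ≤ k → pvIter forest i n = some (g i) := by
    intro i hik
    obtain ⟨m, hm⟩ := pvIter_isSome_of_le forest hik hk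
    simp [hg, hm]
  have hnd : ((List.range k).map g).Nodup := by
    refine List.Nodup.map_on ?_ (List.nodup_range)
    intro x hx y hy hxy
    rw [List.mem_range] at hx hy
    by_contra hne
    rcases Nat.lt_or_ge x y with hlt | hge
    · exact pvIter_inj forest hr hk hlt (by omega) (hsome x (by omega))
        (hxy ▸ hsome y (by omega))
    · have hlt : y < x := by omega
      exact pvIter_inj forest hr hk hlt (by omega) (hsome y (by omega))
        (hxy ▸ hsome x (by omega))
  have hsub : ((List.range k).map g) ⊆ forest.map Prod.fst := by
    intro x hx
    rw [List.mem_map] at hx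
    obtain ⟨i, hi, rfl⟩ := hx
    rw [List.mem_range] at hi
    have h1 : pvIter forest (i + 1) n = match pvIter forest i n with
        | none => none
        | some m => pvIter forest 1 m := pvIter_add forest i 1 n
    rw [hsome i (by omega)] at h1
    have h2 := hsome (i + 1) (by omega)
    rw [h1] at h2
    by_contra hmem
    have := (pvPf_eq_none forest (g i)).2 hmem
    simp [pvIter, this] at h2
  have := List.Subperm.length_le (List.subperm_of_subset hnd hsub)
  simpa using this

-- ---- chase facts ----

theorem pvChase_some (forest : List (Int × Int)) :
    ∀ (fuel : Nat) (seen : PySem.Set Int) (cur r : Int),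
      pvChase forest fuel seen cur = some r →
      pvPf forest r = none ∧ pvReach forest r cur := by
  intro fuel
  induction fuel with
  | zero => intro seen cur r h; simp [pvChase] at h
  | succ f ih =>
    intro seen cur r h
    rw [pvChase] at h
    cases hc : PySem.Dict.get? ⟨forest⟩ cur with
    | none =>
      rw [hc] at h
      cases h
      exact ⟨hc, 0, rfl⟩
    | some p =>
      rw [hc] at h
      dsimp only at h
      by_cases hs : PySem.Set.contains seen cur = true
      · rw [if_pos hs] at h; cases h
      · rw [if_neg hs] at h
        obtain ⟨hnone, k, hk⟩ := ih _ _ _ h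
        refine ⟨hnone, k + 1, ?_⟩
        show pvIter forest (k + 1) cur = some r
        simp only [pvIter, pvPf, hc]
        exact hk

theorem pvChase_complete (forest : List (Int × Int)) {r : Int} (hr : pvPf forest r = none) :
    ∀ (k fuel : Nat) (seen : PySem.Set Int) (cur : Int),
      pvIter forest k cur = some r → k < fuel →
      (∀ i m, i < k → pvIter forest i cur = some m → m ∉ seen) →
      (∀ i j a, i < j → j ≤ k → pvIter forest i cur = some a → pvIter forest j cur ≠ some a) →
      pvChase forest fuel seen cur = some r := by
  intro k
  induction k with
  | zero =>
    intro fuel seen cur hk hfuel _ _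
    obtain rfl : cur = r := by simpa [pvIter] using hk
    obtain ⟨f, rfl⟩ : ∃ f, fuel = f + 1 := ⟨fuel - 1, by omega⟩
    rw [pvChase]
    rw [show PySem.Dict.get? ⟨forest⟩ cur = none from hr]
  | succ k ih =>
    intro fuel seen cur hk hfuel hseen hdist
    have hpf : ∃ p, pvPf forest cur = some p := by
      cases hp : pvPf forest cur with
      | none => exfalso; rw [show pvIter forest (k + 1) cur = none by simp [pvIter, hp]] at hk
                exact absurd hk (by simp)
      | some p => exact ⟨p, rfl⟩
    obtain ⟨p, hp⟩ := hpf
    have hstep : ∀ i, pvIter forest (i + 1) cur = pvIter forest i p := by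
      intro i
      rw [show i + 1 = 1 + i by omega, pvIter_add forest 1 i cur]
      simp [pvIter, hp]
    have hkp : pvIter forest k p = some r := by rw [← hstep k]; exact hk
    obtain ⟨f, rfl⟩ : ∃ f, fuel = f + 1 := ⟨fuel - 1, by omega⟩
    rw [pvChase]
    have hpc : PySem.Dict.get? ⟨forest⟩ cur = some p := hp
    rw [hpc]
    dsimp only
    have hcurs : cur ∉ seen := hseen 0 cur (by omega) rfl
    rw [if_neg (by simpa [PySem.Set.contains, List.contains_iff_mem] using hcurs)]
    refine ih f (PySem.Set.add seen cur) p hkp (by omega) ?_ ?_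
    · intro i m hi him hmem
      rcases (PySem.Set.mem_add seen cur m).1 hmem with h | h
      · exact hseen (i + 1) m (by omega) ((hstep i) ▸ him) h
      · exact hdist 0 (i + 1) cur (by omega) (by omega) rfl
          (by rw [hstep i, him, h])
    · intro i j a hij hjk hia
      have := hdist (i + 1) (j + 1) a (by omega) (by omega) ((hstep i) ▸ hia)
      rw [hstep j] at this
      exact this

theorem pvChase_iff (forest : List (Int × Int))
    {r : Int} (hr : pvPf forest r = none) (n : Int) :
    pvChase forest (forest.length + 1) PySem.Set.empty n = some r ↔ pvReach forest r n := by
  constructor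
  · intro h
    exact (pvChase_some forest _ _ _ _ h).2
  · rintro ⟨k, hk⟩
    refine pvChase_complete forest hr k (forest.length + 1) PySem.Set.empty n hk ?_ ?_ ?_
    · have := pvIter_len_le forest hr hk
      omega
    · intro i m _ _
      simp [PySem.Set.empty]
    · intro i j a hij hjk hia
      exact pvIter_inj forest hr hk hij hjk hia

-- ---- tally characterisation ----

theorem pvTally_getD (forest : List (Int × Int)) (nodes : List Int) (r : Int) :
    (pvTally forest nodes).getD r 0 = ((nodes.countP (pvP forest r) : Nat) : Int) := by
  suffices h : ∀ (l : List Int) (d : PySem.Dict Int Int),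
      (l.foldl
        (fun d n =>
          match pvChase forest (forest.length + 1) PySem.Set.empty n with
          | some r => d.insert r (d.getD r 0 + 1)
          | none => d)
        d).getD r 0 = d.getD r 0 + ((l.countP (pvP forest r) : Nat) : Int) by
    unfold pvTally
    rw [h nodes PySem.Dict.empty, PySem.Dict.getD_empty]
    ring
  intro l
  induction l with
  | nil => intro d; simp
  | cons n t ih =>
    intro d
    rw [List.foldl_cons]
    cases hc : pvChase forest (forest.length + 1) PySem.Set.empty n with
    | none =>
      have hp : pvP forest r n = false := by unfold pvP; rw [hc]; rfl
      rw [ih d, List.countP_cons, hp]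
      simp
    | some r' =>
      by_cases hrr : r' = r
      · subst hrr
        have hp : pvP forest r' n = true := by unfold pvP; rw [hc]; simp
        rw [ih _, PySem.Dict.getD_insert_self, List.countP_cons, hp]
        push_cast
        simp
        omega
      · have hp : pvP forest r n = false := by unfold pvP; rw [hc]; simp [hrr]
        rw [ih _, PySem.Dict.getD_insert_of_ne _ _ _ (Ne.symm hrr), List.countP_cons, hp]
        simp

-- ---- reachability helpers ----

theorem pvReach_child (forest : List (Int × Int)) {r n p : Int}
    (hp : pvPf forest n = some p) (h : pvReach forest r p) : pvReach forest r n := by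
  obtain ⟨k, hk⟩ := h
  exact ⟨k + 1, by simp only [pvIter, hp]; exact hk⟩

theorem pvClosed_reach (forest : List (Int × Int)) (visited : List Int) (r : Int)
    (hcl : ∀ v ∈ visited, ∀ c, pvPf forest c = some v → c ∈ visited) (hrv : r ∈ visited) :
    ∀ (k : Nat) (n : Int), pvIter forest k n = some r → n ∈ visited := by
  intro k
  induction k with
  | zero =>
    intro n h
    obtain rfl : n = r := by simpa [pvIter] using h
    exact hrv
  | succ k ih =>
    intro n h
    cases hp : pvPf forest n with
    | none => rw [show pvIter forest (k + 1) n = none by simp [pvIter, hp]] at h; cases h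
    | some p =>
      have hk : pvIter forest k p = some r := by simpa [pvIter, hp] using h
      exact hcl p (ih p hk) n hp

theorem pvKey_of_pf_some (forest : List (Int × Int)) {n p : Int}
    (hp : pvPf forest n = some p) : n ∈ forest.map Prod.fst := by
  by_contra h
  rw [← pvPf_eq_none forest n] at h
  rw [hp] at h
  cases h

theorem pvReach_mem_all (forest : List (Int × Int)) {r n : Int}
    (hrall : r ∈ (pvSets forest).1) (h : pvReach forest r n) : n ∈ (pvSets forest).1 := by
  obtain ⟨k, hk⟩ := h
  cases k with
  | zero =>
    obtain rfl : n = r := by simpa [pvIter] using hk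
    exact hrall
  | succ k =>
    cases hp : pvPf forest n with
    | none => rw [show pvIter forest (k + 1) n = none by simp [pvIter, hp]] at hk; cases hk
    | some p =>
      have hkeys := pvKey_of_pf_some forest hp
      rw [List.mem_map] at hkeys
      obtain ⟨q, hq, rfl⟩ := hkeys
      exact (pvAll_mem forest q.1).2 ⟨q, hq, Or.inl rfl⟩

theorem pvCountP_split (l : List (Int × Int)) (f g h : (Int × Int) → Bool)
    (hpt : ∀ x ∈ l, (h x).toNat = (f x).toNat + (g x).toNat) :
    l.countP h = l.countP f + l.countP g := by
  induction l with
  | nil => simp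
  | cons a t ih =>
    have ha := hpt a (List.mem_cons_self)
    have ht := ih (fun x hx => hpt x (List.mem_cons_of_mem a hx))
    simp only [List.countP_cons, ht]
    cases hf : f a <;> cases hg : g a <;> cases hh : h a <;>
      simp [hf, hg, hh] at ha ⊢ <;> omega

-- the value of the while loop once the queue has drained
theorem pvBfs_terminal (forest : List (Int × Int)) {r : Int}
    (hr : pvPf forest r = none) (hrall : r ∈ (pvSets forest).1)
    (visited : PySem.Set Int) (count : Int)
    (hcount : count = (visited.length : Int)) (hnodup : visited.Nodup)
    (hclosed : ∀ v ∈ visited, ∀ c, pvPf forest c = some v → c ∈ visited)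
    (hvR : ∀ v ∈ visited, pvReach forest r v) (hrv : r ∈ visited) :
    count = (((pvSets forest).1.countP (pvP forest r) : Nat) : Int) := by
  have hmem : ∀ n : Int, n ∈ visited ↔ n ∈ (pvSets forest).1.filter (pvP forest r) := by
    intro n
    rw [List.mem_filter]
    constructor
    · intro hn
      refine ⟨pvReach_mem_all forest hrall (hvR n hn), ?_⟩
      unfold pvP
      rw [(pvChase_iff forest hr n).2 (hvR n hn)]
      simp
    · rintro ⟨-, hp⟩
      unfold pvP at hp
      rw [beq_iff_eq] at hp
      obtain ⟨k, hk⟩ := (pvChase_some forest _ _ _ _ hp).2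
      exact pvClosed_reach forest visited r hclosed hrv k n hk
  have hperm := (List.perm_ext_iff_of_nodup hnodup
    (List.Nodup.filter _ (pvAll_nodup forest))).2 hmem
  rw [hcount, hperm.length_eq, ← List.countP_eq_length_filter]

-- ---- BFS characterisation ----

theorem pvBfs_spec (forest : List (Int × Int)) (hnd : (forest.map Prod.fst).Nodup)
    {r : Int} (hr : pvPf forest r = none) (hrall : r ∈ (pvSets forest).1) :
    ∀ (fuel : Nat) (queue : List Int) (visited : PySem.Set Int) (count : Int),
      queue.length + forest.countP (fun cp => !(PySem.Set.contains visited cp.2)) ≤ fuel →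
      count = (visited.length : Int) →
      visited.Nodup →
      (∀ v ∈ visited, ∀ c, pvPf forest c = some v → c ∈ visited ∨ c ∈ queue) →
      (∀ q ∈ queue, pvReach forest r q) →
      (∀ v ∈ visited, pvReach forest r v) →
      (r ∈ visited ∨ r ∈ queue) →
      pvBfs (pvAdj forest) fuel queue visited count = (((pvSets forest).1.countP (pvP forest r) : Nat) : Int) := by
  intro fuel
  induction fuel with
  | zero =>
    intro queue visited count hm hcount hnodup hclosed hqR hvR hrmem
    cases queue with
    | cons node rest => exfalso; simp [List.length_cons] at hm
    | nil =>
      show count = _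
      exact pvBfs_terminal forest hr hrall visited count hcount hnodup
        (fun v hv c hc => (hclosed v hv c hc).resolve_right (by simp))
        hvR (hrmem.resolve_right (by simp))
  | succ f ih =>
    intro queue visited count hm hcount hnodup hclosed hqR hvR hrmem
    cases queue with
    | nil =>
      show count = _
      exact pvBfs_terminal forest hr hrall visited count hcount hnodup
        (fun v hv c hc => (hclosed v hv c hc).resolve_right (by simp))
        hvR (hrmem.resolve_right (by simp))
    | cons node rest =>
      rw [pvBfs]
      by_cases hvis : PySem.Set.contains visited node = true
      · rw [if_pos hvis]
        have hnodem : node ∈ visited := by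
          simpa [PySem.Set.contains, List.contains_iff_mem] using hvis
        refine ih rest visited count ?_ hcount hnodup ?_ ?_ hvR ?_
        · simp only [List.length_cons] at hm; omega
        · intro v hv c hc
          rcases hclosed v hv c hc with h | h
          · exact Or.inl h
          · rcases List.mem_cons.1 h with rfl | h
            · exact Or.inl hnodem
            · exact Or.inr h
        · exact fun q hq => hqR q (List.mem_cons_of_mem node hq)
        · rcases hrmem with h | h
          · exact Or.inl h
          · rcases List.mem_cons.1 h with rfl | h
            · exact Or.inl hnodem
            · exact Or.inr h
      · rw [if_neg hvis]
        have hnodem : node ∉ visited := by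
          intro h
          exact hvis (by simpa [PySem.Set.contains, List.contains_iff_mem] using h)
        have hadd : PySem.Set.add visited node = visited ++ [node] := by
          unfold PySem.Set.add
          rw [if_neg hvis]
        have hreachnode : pvReach forest r node := hqR node List.mem_cons_self
        have hadjmem : ∀ c : Int, c ∈ (pvAdj forest).getD node [] ↔ pvPf forest c = some node := by
          intro c
          rw [pvAdj_getD, List.mem_map]
          constructor
          · rintro ⟨cp, hcp, rfl⟩
            rw [List.mem_filter] at hcp
            have h2 : cp.2 = node := by simpa using hcp.2
            rw [pvPf_eq_some forest hnd]
            rw [← h2]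
            exact hcp.1
          · intro hc
            rw [pvPf_eq_some forest hnd] at hc
            exact ⟨(c, node), List.mem_filter.2 ⟨hc, by simp⟩, rfl⟩
        refine ih (rest ++ (pvAdj forest).getD node []) (PySem.Set.add visited node)
          (count + 1) ?_ ?_ (pvSet_nodup_add hnodup node) ?_ ?_ ?_ ?_
        · -- the measure decreases
          have hadjlen : ((pvAdj forest).getD node []).length =
              forest.countP (fun cp => cp.2 == node) := by
            rw [pvAdj_getD, List.length_map, List.countP_eq_length_filter]
          have hsplit := pvCountP_split forest
            (fun cp => !(PySem.Set.contains (PySem.Set.add visited node) cp.2))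
            (fun cp => cp.2 == node)
            (fun cp => !(PySem.Set.contains visited cp.2)) ?_
          · simp only [List.length_append, List.length_cons] at hm ⊢
            omega
          · intro cp _
            dsimp only
            by_cases hcp : cp.2 = node
            · have h1 : PySem.Set.contains (PySem.Set.add visited node) cp.2 = true := by
                rw [hcp, hadd]
                simp [PySem.Set.contains]
              have h2 : PySem.Set.contains visited cp.2 = false := by
                rw [hcp]
                exact eq_false_of_ne_true hvis
              rw [show (PySem.Set.contains visited cp.2) = false from h2, h1, hcp]
              simp
            · have h1 : PySem.Set.contains (PySem.Set.add visited node) cp.2 =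
                  PySem.Set.contains visited cp.2 := by
                rw [hadd]
                cases hcv : PySem.Set.contains visited cp.2 with
                | true =>
                  have : cp.2 ∈ visited := by
                    simpa [PySem.Set.contains, List.contains_iff_mem] using hcv
                  simp [PySem.Set.contains, this]
                | false =>
                  have : cp.2 ∉ visited := by
                    intro h
                    rw [show (PySem.Set.contains visited cp.2) = true by
                      simpa [PySem.Set.contains, List.contains_iff_mem] using h] at hcv
                    cases hcv
                  simp [PySem.Set.contains, this, hcp]
              rw [h1, show (cp.2 == node) = false by simp [hcp]]
              simp
        · rw [hadd]
          simp only [List.length_append, List.length_singleton]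
          omega
        · -- closure
          intro v hv c hc
          rw [hadd] at hv
          rcases List.mem_append.1 hv with hv | hv
          · rcases hclosed v hv c hc with h | h
            · exact Or.inl (by rw [hadd]; exact List.mem_append_left _ h)
            · rcases List.mem_cons.1 h with rfl | h
              · exact Or.inl (by rw [hadd]; exact List.mem_append_right _ (by simp))
              · exact Or.inr (List.mem_append_left _ h)
          · obtain rfl : v = node := by simpa using hv
            exact Or.inr (List.mem_append_right _ ((hadjmem c).2 hc))
        · -- queue elements reach r
          intro q hq
          rcases List.mem_append.1 hq with hq | hq
          · exact hqR q (List.mem_cons_of_mem node hq)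
          · exact pvReach_child forest ((hadjmem q).1 hq) hreachnode
        · -- visited elements reach r
          intro v hv
          rw [hadd] at hv
          rcases List.mem_append.1 hv with hv | hv
          · exact hvR v hv
          · obtain rfl : v = node := by simpa using hv
            exact hreachnode
        · -- r is visited or queued
          rcases hrmem with h | h
          · exact Or.inl (by rw [hadd]; exact List.mem_append_left _ h)
          · rcases List.mem_cons.1 h with rfl | h
            · exact Or.inl (by rw [hadd]; exact List.mem_append_right _ (by simp))
            · exact Or.inr (List.mem_append_left _ h)

-- ---- sizes agree on roots ----

theorem pvSize_eq (forest : List (Int × Int)) (hnd : (forest.map Prod.fst).Nodup)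
    {root : Int} (hroot : root ∈ pvRoots forest) :
    pvBfs (pvAdj forest) (forest.length + 1) [root] PySem.Set.empty 0 =
      (pvTally forest (pvSets forest).1).getD root 0 := by
  have hroot' := (pvRoots_mem forest root).1 hroot
  have hpf : pvPf forest root = none := (pvPf_eq_none forest root).2 hroot'.2
  rw [pvTally_getD]
  refine pvBfs_spec forest hnd hpf hroot'.1 (forest.length + 1) [root] PySem.Set.empty 0
    ?_ ?_ ?_ ?_ ?_ ?_ ?_
  · have := List.countP_le_length
      (p := fun cp : Int × Int => !(PySem.Set.contains PySem.Set.empty cp.2)) (l := forest)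
    simp only [List.length_singleton]
    omega
  · simp [PySem.Set.empty]
  · exact List.nodup_nil
  · intro v hv
    simp [PySem.Set.empty] at hv
  · intro q hq
    obtain rfl : q = root := by simpa using hq
    exact ⟨0, rfl⟩
  · intro v hv
    simp [PySem.Set.empty] at hv
  · exact Or.inr (by simp)

theorem pvSelect_congr (roots : List Int) (f g : Int → Int)
    (h : ∀ root ∈ roots, f root = g root) : pvSelect roots f = pvSelect roots g := by
  unfold pvSelect
  congr 1
  apply PySem.List.foldl_congr_mem
  intro acc x hx
  simp only [h x hx]

-- ===== VERDICT (by name: the statement is the Claim_ definition above) =====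
theorem findLargestTreeRoot_spec : Claim_equal_findLargestTreeRoot := by
  intro forest _ hnd
  unfold Spec_findLargestTreeRoot findLargestTreeRoot findLargestTreeRoot_alt
  exact pvSelect_congr _ _ _ (fun root hroot => pvSize_eq forest hnd hroot)
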